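-- pv_equiv track=rewrite | github.com/da-in/algorithm-study | Programmers - 문제풀이/할인행사/dain.py | solution
-- ===== SOURCE A (Python) =====
-- def solution(want, number, discount):
--     # sliding window
--     answer = 0
--     target = {}
--     for i in range(len(want)):
--         target[want[i]] = number[i]
--
--     window = {}
--     for k in target.keys():
--         window[k] = discount[:10].count(k)
--     o = -1
--     i = 9
--     if window == target:
--         answer += 1
--
--     while i < len(discount) - 1:
--         o += 1
--         i += 1
--         if discount[o] in window.keys():
--             window[discount[o]] -= 1
--         if discount[i] in window.keys():
--             window[discount[i]] += 1
--         if target == window: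
--             answer += 1
--
--     return answer
-- ===== SOURCE B (Python) =====
-- def solution(want, number, discount):
--     # Incremental sliding window: keep a count of currently matching keys
--     # instead of comparing whole dicts at every step.
--     target = {}
--     for w, n in zip(want, number):
--         target[w] = n
--     window = {}
--     for k in target:
--         window[k] = 0
--     for item in discount[:10]:
--         if item in window:
--             window[item] += 1
--     matched = 0
--     for k in target:
--         if window[k] == target[k]:
--             matched += 1
--     K = len(target)
--     answer = 1 if matched == K else 0
--     for o in range(len(discount) - 10):
--         i = o + 10
--         out = discount[o]
--         if out in window:
--             if window[out] == target[out]: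
--                 matched -= 1
--             window[out] -= 1
--             if window[out] == target[out]:
--                 matched += 1
--         inn = discount[i]
--         if inn in window:
--             if window[inn] == target[inn]:
--                 matched -= 1
--             window[inn] += 1
--             if window[inn] == target[inn]:
--                 matched += 1
--         if matched == K:
--             answer += 1
--     return answer
-- ===== Notes on version B (the rewrite author's own statement) =====
-- stated objective: alternative
-- what changed: B replaces A's full dict-equality comparison at every window position by an incrementally maintained count of keys whose window tally currently matches the target, updated only at the two keys that change per slide.
import Mathlib
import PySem

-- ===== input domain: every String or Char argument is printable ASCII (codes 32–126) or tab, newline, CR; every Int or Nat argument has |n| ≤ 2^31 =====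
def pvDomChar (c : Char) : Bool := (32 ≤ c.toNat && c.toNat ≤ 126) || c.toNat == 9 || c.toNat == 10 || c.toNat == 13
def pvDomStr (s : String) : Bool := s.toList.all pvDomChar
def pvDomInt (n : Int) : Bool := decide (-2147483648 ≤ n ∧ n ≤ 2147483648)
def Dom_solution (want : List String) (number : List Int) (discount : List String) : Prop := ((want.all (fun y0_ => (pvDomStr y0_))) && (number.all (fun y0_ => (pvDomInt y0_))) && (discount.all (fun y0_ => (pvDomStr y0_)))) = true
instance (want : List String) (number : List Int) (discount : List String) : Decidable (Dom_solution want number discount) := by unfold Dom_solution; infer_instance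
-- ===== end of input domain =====

-- B replaces A's full dict comparison at every window position by an incrementally
-- maintained count of matching keys (updated only at the two changed keys per slide).

-- ===== PORT A =====

-- Python dict `==` (order-insensitive): same size and every item of d1 found in d2.
def pvDictEq (d1 d2 : PySem.Dict String Int) : Bool :=
  d1.size == d2.size && d1.items.all (fun p => d2.get? p.1 == some p.2)

-- A's `while i < len(discount) - 1` loop, state (window, o, i, answer).
def solutionLoop (discount : List String) (target : PySem.Dict String Int)
    (window : PySem.Dict String Int) (o i answer : Int) : Int :=
  if h : i < (discount.length : Int) - 1 then
    let o' := o + 1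
    let i' := i + 1
    let w1 := if window.contains (PySem.List.pyGetD discount o' "") then
        window.modify (PySem.List.pyGetD discount o' "") 0 (· - 1) else window
    let w2 := if w1.contains (PySem.List.pyGetD discount i' "") then
        w1.modify (PySem.List.pyGetD discount i' "") 0 (· + 1) else w1
    let a' := if pvDictEq target w2 then answer + 1 else answer
    solutionLoop discount target w2 o' i' a'
  else answer
termination_by ((discount.length : Int) - 1 - i).toNat
decreasing_by omega

def solution (want : List String) (number : List Int) (discount : List String) : Int :=
  let target := (PySem.List.pyRange 0 (want.length : Int) 1).foldl
      (fun d idx => d.insert (PySem.List.pyGetD want idx "") (PySem.List.pyGetD number idx 0))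
      PySem.Dict.empty
  let window := target.keys.foldl
      (fun w k => w.insert k ((PySem.List.slice discount none (some 10)).count k : Int))
      PySem.Dict.empty
  let answer : Int := if pvDictEq window target then 0 + 1 else 0
  solutionLoop discount target window (-1) 9 answer

-- ===== PORT B =====

-- one iteration of B's `for o in range(len(discount) - 10)` loop; state (window, matched, answer)
def solutionAltStep (discount : List String) (target : PySem.Dict String Int) (K : Int)
    (st : PySem.Dict String Int × Int × Int) (o : Int) : PySem.Dict String Int × Int × Int :=
  let w := st.1
  let m := st.2.1
  let a := st.2.2
  let i := o + 10
  let out := PySem.List.pyGetD discount o ""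
  let p1 :=
    if w.contains out then
      let m' := if w.getD out 0 = target.getD out 0 then m - 1 else m
      let w' := w.modify out 0 (· - 1)
      let m'' := if w'.getD out 0 = target.getD out 0 then m' + 1 else m'
      (w', m'')
    else (w, m)
  let inn := PySem.List.pyGetD discount i ""
  let p2 :=
    if p1.1.contains inn then
      let m' := if p1.1.getD inn 0 = target.getD inn 0 then p1.2 - 1 else p1.2
      let w' := p1.1.modify inn 0 (· + 1)
      let m'' := if w'.getD inn 0 = target.getD inn 0 then m' + 1 else m'
      (w', m'')
    else p1
  let a' := if p2.2 = K then a + 1 else a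
  (p2.1, p2.2, a')

def solution_alt (want : List String) (number : List Int) (discount : List String) : Int :=
  let target := (want.zip number).foldl (fun d p => d.insert p.1 p.2) PySem.Dict.empty
  let window0 := target.keys.foldl (fun w k => w.insert k (0 : Int)) PySem.Dict.empty
  let window := (PySem.List.slice discount none (some 10)).foldl
      (fun w item => if w.contains item then w.modify item 0 (· + 1) else w) window0
  let matched := target.keys.foldl
      (fun m k => if window.getD k 0 = target.getD k 0 then m + 1 else m) (0 : Int)
  let K : Int := target.size
  let answer : Int := if matched = K then 1 else 0
  ((PySem.List.pyRange 0 ((discount.length : Int) - 10) 1).foldl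
      (solutionAltStep discount target K) (window, matched, answer)).2.2

-- ===== PRECONDITION & SPEC =====
-- A indexes number[i] for every i < len(want): it raises IndexError iff len(number) < len(want).
def Pre_solution (want : List String) (number : List Int) (discount : List String) : Prop :=
  want.length ≤ number.length
instance (want : List String) (number : List Int) (discount : List String) : Decidable (Pre_solution want number discount) := by unfold Pre_solution; infer_instance
def pvWitness_solution : List String × List Int × List String := (["a"], [1], ["a", "b"])

def Spec_solution (want : List String) (number : List Int) (discount : List String) (out : Int) : Prop := out = solution_alt want number discount
instance (want : List String) (number : List Int) (discount : List String) (out : Int) : Decidable (Spec_solution want number discount out) := by unfold Spec_solution; infer_instance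

-- ===== CLAIM (what is proved, stated in full; the proofs are below) =====
def Claim_equal_solution : Prop := ∀ (want : List String) (number : List Int) (discount : List String), Dom_solution want number discount → Pre_solution want number discount → Spec_solution want number discount (solution want number discount)


-- ===== LEMMAS AND PROOFS =====

-- A's index loop builds the same target dict as B's zip loop.
lemma pv_target_eq (want : List String) (number : List Int) (h : want.length ≤ number.length) :
    (PySem.List.pyRange 0 (want.length : Int) 1).foldl
      (fun d idx => d.insert (PySem.List.pyGetD want idx "") (PySem.List.pyGetD number idx 0))
      PySem.Dict.empty
    = (want.zip number).foldl (fun d p => d.insert p.1 p.2) PySem.Dict.empty := by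
  have hmap : (PySem.List.pyRange 0 (want.length : Int) 1).map
      (fun idx => (PySem.List.pyGetD want idx "", PySem.List.pyGetD number idx 0))
      = want.zip number := by
    apply List.ext_getElem
    · simp [PySem.List.length_pyRange_one]
      omega
    · intro k h1 h2
      have hkw : k < want.length := by
        simpa [PySem.List.length_pyRange_one] using h1
      have hkn : k < number.length := by omega
      simp only [List.getElem_map, PySem.List.getElem_pyRange_one, List.getElem_zip]
      rw [zero_add (k : Int), PySem.List.pyGetD_eq_getElem _ _ (by omega) (by exact_mod_cast hkw),
        PySem.List.pyGetD_eq_getElem _ _ (by omega) (by exact_mod_cast hkn)]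
      simp
  rw [← hmap, List.foldl_map]

-- keys are untouched by B's counting loop over discount[:10]
lemma pv_incfold_keys (l : List String) (d : PySem.Dict String Int) :
    (l.foldl (fun w item => if w.contains item then w.modify item 0 (· + 1) else w) d).keys
      = d.keys := by
  induction l generalizing d with
  | nil => rfl
  | cons x l ih =>
    simp only [List.foldl_cons]
    rcases hc : d.contains x with _ | _
    · simp only [Bool.false_eq_true, if_false, ih]
    · rw [if_pos rfl, ih, PySem.Dict.keys_modify, PySem.Dict.keys_insert_of_contains d _ hc]

-- values after B's counting loop
lemma pv_incfold_getD (l : List String) (d : PySem.Dict String Int) (k : String) :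
    (l.foldl (fun w item => if w.contains item then w.modify item 0 (· + 1) else w) d).getD k 0
      = d.getD k 0 + (if d.contains k then (l.count k : Int) else 0) := by
  induction l generalizing d with
  | nil => simp
  | cons x l ih =>
    simp only [List.foldl_cons]
    rcases hc : d.contains x with _ | _
    · rw [if_neg (by simp), ih]
      by_cases hk : k = x
      · subst hk; simp [hc]
      · simp [Ne.symm hk]
    · rw [if_pos rfl, ih, PySem.Dict.getD_modify, PySem.Dict.contains_modify]
      by_cases hk : k = x
      · subst hk; simp [hc]; ring
      · simp [hk, Ne.symm hk]

-- countP after a pointwise change at one key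
lemma pv_countP_update (ks : List String) (hnd : ks.Nodup) (x : String) (hx : x ∈ ks)
    (p p' : String → Bool) (hne : ∀ k, k ≠ x → p' k = p k) :
    (ks.countP p' : Int)
      = (ks.countP p : Int) - (if p x then 1 else 0) + (if p' x then 1 else 0) := by
  induction ks with
  | nil => simp at hx
  | cons a ks ih =>
    rcases List.nodup_cons.1 hnd with ⟨ha, hnd'⟩
    rcases List.mem_cons.1 hx with rfl | hx
    · have hc : ks.countP p' = ks.countP p :=
        List.countP_congr (fun k hk => by rw [hne k (fun h => ha (h ▸ hk))])
      simp only [List.countP_cons, hc]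
      push_cast
      split_ifs <;> omega
    · have hax : a ≠ x := fun h => ha (h ▸ hx)
      have := ih hnd' hx
      simp only [List.countP_cons, hne a hax]
      push_cast at this ⊢
      split_ifs at this ⊢ <;> omega

lemma pv_size_eq_keys_length (d : PySem.Dict String Int) : d.size = d.keys.length := by
  simp [PySem.Dict.size, PySem.Dict.keys]

lemma pv_get?_of_mem_keys (d : PySem.Dict String Int) (k : String) (hk : k ∈ d.keys) :
    d.get? k = some (d.getD k 0) := by
  rcases h : d.get? k with _ | v
  · exact absurd ((PySem.Dict.get?_eq_none_iff_not_mem_keys d k).1 h) (by simpa using hk)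
  · simp [PySem.Dict.getD_eq_get?_getD, h]

-- Python dict equality d1 == d2 as a match count, when the key lists coincide
lemma pv_dictEq_iff (d1 d2 : PySem.Dict String Int) (h1 : d1.keys.Nodup)
    (hk : d2.keys = d1.keys) :
    (pvDictEq d1 d2 = true)
      ↔ d1.keys.countP (fun k => decide (d2.getD k 0 = d1.getD k 0)) = d1.keys.length := by
  have hsz : d1.size = d2.size := by rw [pv_size_eq_keys_length, pv_size_eq_keys_length, hk]
  have key : ∀ k ∈ d1.keys, (d2.get? k == some (d1.getD k 0)) = decide (d2.getD k 0 = d1.getD k 0) := by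
    intro k hkm
    rw [pv_get?_of_mem_keys d2 k (hk ▸ hkm)]
    simp [Bool.beq_eq_decide_eq]
  rw [pvDictEq, Bool.and_eq_true, PySem.Dict.items_eq_map_keys d1 h1 0, List.all_map,
    List.countP_eq_length]
  constructor
  · rintro ⟨-, hall⟩ k hkm
    rw [← key k hkm]
    exact (List.all_eq_true.1 hall) k hkm
  · intro hall
    refine ⟨by simp [hsz], List.all_eq_true.2 fun k hkm => ?_⟩
    rw [Function.comp_apply, key k hkm]
    exact hall k hkm

-- one guarded modify: keys preserved and the match count shifts only at the touched key
lemma pv_half (t w : PySem.Dict String Int) (ht : t.keys.Nodup) (hk : w.keys = t.keys)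
    (c : String) (hc : w.contains c = true) (δ : Int → Int) :
    (w.modify c 0 δ).keys = t.keys ∧
    ((t.keys.countP (fun k => decide ((w.modify c 0 δ).getD k 0 = t.getD k 0)) : Int)
      = (t.keys.countP (fun k => decide (w.getD k 0 = t.getD k 0)) : Int)
        - (if w.getD c 0 = t.getD c 0 then 1 else 0)
        + (if (w.modify c 0 δ).getD c 0 = t.getD c 0 then 1 else 0)) := by
  have hcm : c ∈ t.keys := by
    rw [← hk, ← PySem.Dict.contains_iff_mem_keys]
    exact hc
  refine ⟨by rw [PySem.Dict.keys_modify, PySem.Dict.keys_insert_of_contains w _ hc, hk], ?_⟩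
  have := pv_countP_update t.keys ht c hcm
      (fun k => decide (w.getD k 0 = t.getD k 0))
      (fun k => decide ((w.modify c 0 δ).getD k 0 = t.getD k 0))
      (fun k hkc => by simp only []; rw [PySem.Dict.getD_modify]; simp [hkc])
  rw [this]
  simp only [decide_eq_true_eq]

-- the match count invariant, as a function
def pvCnt (t w : PySem.Dict String Int) : Int :=
  (t.keys.countP (fun k => decide (w.getD k 0 = t.getD k 0)) : Int)

-- one iteration of B's loop, from an invariant-respecting state
lemma pv_step (discount : List String) (t : PySem.Dict String Int) (ht : t.keys.Nodup)
    (w : PySem.Dict String Int) (hk : w.keys = t.keys) (a j : Int)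
    (w1 w2 : PySem.Dict String Int)
    (hw1 : w1 = if w.contains (PySem.List.pyGetD discount j "") then
        w.modify (PySem.List.pyGetD discount j "") 0 (· - 1) else w)
    (hw2 : w2 = if w1.contains (PySem.List.pyGetD discount (j + 10) "") then
        w1.modify (PySem.List.pyGetD discount (j + 10) "") 0 (· + 1) else w1) :
    w2.keys = t.keys ∧
    solutionAltStep discount t (t.size : Int) (w, pvCnt t w, a) j
      = (w2, pvCnt t w2, if pvCnt t w2 = (t.size : Int) then a + 1 else a) := by
  have step1 : w1.keys = t.keys ∧
      (if w.contains (PySem.List.pyGetD discount j "") then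
        (if w1.getD (PySem.List.pyGetD discount j "") 0 = t.getD (PySem.List.pyGetD discount j "") 0 then
          (if w.getD (PySem.List.pyGetD discount j "") 0 = t.getD (PySem.List.pyGetD discount j "") 0 then pvCnt t w - 1 else pvCnt t w) + 1
        else (if w.getD (PySem.List.pyGetD discount j "") 0 = t.getD (PySem.List.pyGetD discount j "") 0 then pvCnt t w - 1 else pvCnt t w))
      else pvCnt t w) = pvCnt t w1 := by
    rcases hc : w.contains (PySem.List.pyGetD discount j "") with _ | _
    · subst hw1; simp [hc, hk]
    · obtain ⟨hkk, hcnt⟩ := pv_half t w ht hk _ hc (· - 1)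
      subst hw1
      simp only [hc, if_true]
      refine ⟨hkk, ?_⟩
      unfold pvCnt
      rw [hcnt]
      split_ifs <;> omega
  obtain ⟨hk1, hm1⟩ := step1
  have step2 : w2.keys = t.keys ∧
      (if w1.contains (PySem.List.pyGetD discount (j + 10) "") then
        (if w2.getD (PySem.List.pyGetD discount (j + 10) "") 0 = t.getD (PySem.List.pyGetD discount (j + 10) "") 0 then
          (if w1.getD (PySem.List.pyGetD discount (j + 10) "") 0 = t.getD (PySem.List.pyGetD discount (j + 10) "") 0 then pvCnt t w1 - 1 else pvCnt t w1) + 1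
        else (if w1.getD (PySem.List.pyGetD discount (j + 10) "") 0 = t.getD (PySem.List.pyGetD discount (j + 10) "") 0 then pvCnt t w1 - 1 else pvCnt t w1))
      else pvCnt t w1) = pvCnt t w2 := by
    rcases hc : w1.contains (PySem.List.pyGetD discount (j + 10) "") with _ | _
    · subst hw2; simp [hc, hk1]
    · obtain ⟨hkk, hcnt⟩ := pv_half t w1 ht hk1 _ hc (· + 1)
      subst hw2
      simp only [hc, if_true]
      refine ⟨hkk, ?_⟩
      unfold pvCnt
      rw [hcnt]
      split_ifs <;> omega
  obtain ⟨hk2, hm2⟩ := step2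
  refine ⟨hk2, ?_⟩
  simp only [solutionAltStep]
  rcases hc1 : w.contains (PySem.List.pyGetD discount j "") with _ | _
  · simp only [hc1, Bool.false_eq_true, if_false] at hw1
    subst hw1
    rcases hc2 : w1.contains (PySem.List.pyGetD discount (j + 10) "") with _ | _
    · simp only [hc2, Bool.false_eq_true, if_false] at hw2
      subst hw2
      simp only [hc1, hc2, Bool.false_eq_true, if_false]
    · simp only [hc2, if_true] at hw2
      subst hw2
      simp only [hc1, hc2, Bool.false_eq_true, if_false, if_true]
      simp only [hc2, if_true] at hm2
      rw [hm2]
  · simp only [hc1, if_true] at hw1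
    subst hw1
    rcases hc2 : (w.modify (PySem.List.pyGetD discount j "") 0 (· - 1)).contains (PySem.List.pyGetD discount (j + 10) "") with _ | _
    · simp only [hc2, Bool.false_eq_true, if_false] at hw2
      subst hw2
      simp only [hc1, hc2, Bool.false_eq_true, if_false, if_true]
      simp only [hc1, if_true] at hm1
      rw [hm1]
    · simp only [hc2, if_true] at hw2
      subst hw2
      simp only [hc1, hc2, Bool.false_eq_true, if_false, if_true]
      simp only [hc1, if_true] at hm1
      simp only [hc2, if_true] at hm2
      rw [hm1, hm2]



-- the two main loops agree, given equal windows and matched = the match count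
lemma pv_loop_eq (discount : List String) (t : PySem.Dict String Int) (ht : t.keys.Nodup) :
    ∀ (n : Nat) (j : Int), 0 ≤ j → n = (((discount.length : Int) - 10) - j).toNat →
    ∀ (w : PySem.Dict String Int) (a : Int), w.keys = t.keys →
    solutionLoop discount t w (j - 1) (j + 9) a
      = ((PySem.List.pyRange j ((discount.length : Int) - 10) 1).foldl
          (solutionAltStep discount t (t.size : Int))
          (w, pvCnt t w, a)).2.2 := by
  intro n
  induction n with
  | zero =>
    intro j hj hn w a hk
    have hge : (discount.length : Int) - 10 ≤ j := by omega
    rw [solutionLoop, dif_neg (by omega), PySem.List.pyRange_one_eq_nil hge]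
    simp
  | succ n ih =>
    intro j hj hn w a hk
    have hlt : j < (discount.length : Int) - 10 := by omega
    rw [solutionLoop, dif_pos (by omega), PySem.List.pyRange_one_cons hlt]
    simp only [List.foldl_cons]
    have e1 : j - 1 + 1 = j := by ring
    have e2 : j + 9 + 1 = j + 10 := by ring
    rw [e1, e2]
    set c1 := PySem.List.pyGetD discount j "" with hc1e
    set c2 := PySem.List.pyGetD discount (j + 10) "" with hc2e
    set w1 := if w.contains c1 then w.modify c1 0 (· - 1) else w with hw1e
    set w2 := if w1.contains c2 then w1.modify c2 0 (· + 1) else w1 with hw2e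
    obtain ⟨hk2, hstep⟩ := pv_step discount t ht w hk a j w1 w2 (by rw [hw1e, hc1e]) (by rw [hw2e, hc2e])
    rw [hstep]
    have hiff : (pvDictEq t w2 = true) ↔ (pvCnt t w2 = (t.size : Int)) := by
      rw [pv_dictEq_iff t w2 ht hk2, pv_size_eq_keys_length]
      unfold pvCnt
      constructor <;> intro h <;> exact_mod_cast h
    rw [if_congr hiff rfl rfl]
    have h := ih (j + 1) (by omega) (by omega) w2 (if pvCnt t w2 = (t.size : Int) then a + 1 else a) hk2
    rw [show j + 1 - 1 = j from by ring, show j + 1 + 9 = j + 10 from by ring] at h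
    exact h

-- ===== VERDICT (by name: the statement is the Claim_ definition above) =====
-- initial window of A = initial window of B (items computed on both sides)
lemma pv_window_eq (t : PySem.Dict String Int) (ht : t.keys.Nodup) (l : List String) :
    t.keys.foldl (fun w k => w.insert k ((l.count k : Int))) PySem.Dict.empty
      = l.foldl (fun w item => if w.contains item then w.modify item 0 (· + 1) else w)
          (t.keys.foldl (fun w k => w.insert k (0 : Int)) PySem.Dict.empty) := by
  have hA : (t.keys.foldl (fun w k => w.insert k ((l.count k : Int))) PySem.Dict.empty).items
      = t.keys.map (fun k => (k, (l.count k : Int))) := by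
    exact PySem.Dict.items_foldl_insert_fresh t.keys (fun k => k) (fun k => (l.count k : Int))
      PySem.Dict.empty (fun a _ => by simp [PySem.Dict.contains_empty]) (by simpa using ht)
  have h0 : (t.keys.foldl (fun w k => w.insert k (0 : Int)) PySem.Dict.empty).items
      = t.keys.map (fun k => (k, (0 : Int))) := by
    exact PySem.Dict.items_foldl_insert_fresh t.keys (fun k => k) (fun _ => (0 : Int))
      PySem.Dict.empty (fun a _ => by simp [PySem.Dict.contains_empty]) (by simpa using ht)
  have h0k : (t.keys.foldl (fun w k => w.insert k (0 : Int)) PySem.Dict.empty).keys = t.keys := by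
    rw [PySem.Dict.keys, h0, List.map_map]
    exact (List.map_congr_left fun a _ => rfl).trans (List.map_id _)
  have hBk : (l.foldl (fun w item => if w.contains item then w.modify item 0 (· + 1) else w)
      (t.keys.foldl (fun w k => w.insert k (0 : Int)) PySem.Dict.empty)).keys = t.keys := by
    rw [pv_incfold_keys, h0k]
  have hBnd : (l.foldl (fun w item => if w.contains item then w.modify item 0 (· + 1) else w)
      (t.keys.foldl (fun w k => w.insert k (0 : Int)) PySem.Dict.empty)).keys.Nodup := by
    rw [hBk]; exact ht
  apply PySem.Dict.ext
  rw [hA, PySem.Dict.items_eq_map_keys _ hBnd 0, hBk]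
  apply List.map_congr_left
  intro k hkm
  have hk0 : k ∈ (t.keys.foldl (fun w k => w.insert k (0 : Int)) PySem.Dict.empty).keys := by
    rw [h0k]; exact hkm
  have hcont : (t.keys.foldl (fun w k => w.insert k (0 : Int)) PySem.Dict.empty).contains k = true := by
    rw [PySem.Dict.contains_iff_mem_keys]; exact hk0
  have hgd0 : (t.keys.foldl (fun w k => w.insert k (0 : Int)) PySem.Dict.empty).getD k 0 = 0 := by
    apply PySem.Dict.getD_of_mem_items
    · rw [h0]; exact List.mem_map.2 ⟨k, hkm, rfl⟩
    · rw [h0k]; exact ht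
  rw [pv_incfold_getD, hgd0, hcont]
  simp

theorem solution_spec : Claim_equal_solution := by
  intro want number discount hdom hpre
  unfold Spec_solution
  have hpre' : want.length ≤ number.length := hpre
  simp only [solution, solution_alt]
  rw [pv_target_eq want number hpre']
  set t := (want.zip number).foldl (fun d p => d.insert p.1 p.2) PySem.Dict.empty with hte
  have ht : t.keys.Nodup := by
    exact PySem.Dict.nodup_keys_foldl_insert_key (want.zip number) (fun p => p.1)
      (fun _ p => p.2) PySem.Dict.empty (by simp [PySem.Dict.keys_empty])
  rw [pv_window_eq t ht (PySem.List.slice discount none (some 10))]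
  set wB := (PySem.List.slice discount none (some 10)).foldl
      (fun w item => if w.contains item then w.modify item 0 (· + 1) else w)
      (t.keys.foldl (fun w k => w.insert k (0 : Int)) PySem.Dict.empty) with hwBe
  have hkB : wB.keys = t.keys := by
    rw [hwBe, pv_incfold_keys, PySem.Dict.keys, PySem.Dict.items_foldl_insert_fresh t.keys
      (fun k => k) (fun _ => (0 : Int)) PySem.Dict.empty
      (fun a _ => by simp [PySem.Dict.contains_empty]) (by simpa using ht)]
    rw [List.map_append]
    exact (by simp [PySem.Dict.empty] : List.map (fun x => x.1) (PySem.Dict.empty : PySem.Dict String Int).items = []) ▸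
      (by rw [List.nil_append, List.map_map]; exact (List.map_congr_left fun a _ => rfl).trans (List.map_id _))
  have hmatched : t.keys.foldl (fun m k => if wB.getD k 0 = t.getD k 0 then m + 1 else m) (0 : Int)
      = pvCnt t wB := by
    rw [PySem.List.foldl_ite_add_one (fun k => wB.getD k 0 = t.getD k 0) t.keys 0]
    unfold pvCnt
    ring
  rw [hmatched]
  have hiff0 : (pvDictEq wB t = true) ↔ (pvCnt t wB = (t.size : Int)) := by
    rw [pv_dictEq_iff wB t (hkB ▸ ht) hkB.symm, pv_size_eq_keys_length]
    unfold pvCnt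
    rw [hkB]
    have hcc : List.countP (fun k => decide (t.getD k 0 = wB.getD k 0)) t.keys
        = List.countP (fun k => decide (wB.getD k 0 = t.getD k 0)) t.keys :=
      List.countP_congr (fun k _ => by simp only [decide_eq_true_eq]; exact eq_comm)
    rw [hcc]
    constructor <;> intro h <;> exact_mod_cast h
  rw [if_congr hiff0 rfl rfl, zero_add]
  have h := pv_loop_eq discount t ht (((discount.length : Int) - 10) - 0).toNat 0 (by omega) rfl
      wB (if pvCnt t wB = (t.size : Int) then 1 else 0) hkB
  rw [show (0 : Int) - 1 = -1 from by ring, show (0 : Int) + 9 = 9 from by ring] at h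
  exact h
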